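-- pv_equiv track=rewrite | github.com/shahanshul8052/aichatbot | chatbot.py | extract_player_name_prediction
-- ===== SOURCE A (Python) =====
-- import string
--
-- def extract_player_name_prediction(message):
--     """
--     Extract the player's name from prediction-related queries like "Predict points for Saka in Gameweek 18."
--     """
--     # Remove punctuation and convert to lowercase
--     clean_message = message.translate(str.maketrans("", "", string.punctuation)).lower()
--
--     words = clean_message.split()
--     for i, word in enumerate(words):
--         if word == "for" and i + 1 < len(words):
--             player_name_parts = []
--             for j in range(i + 1, len(words)):
--                 if words[j] in ["in", "gameweek", "gw"]:  # Stop at boundary terms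
--                     break
--                 player_name_parts.append(words[j])
--             if player_name_parts:
--                 return " ".join(player_name_parts).capitalize()
--     return None  # No player name found
-- ===== SOURCE B (Python) =====
-- import string
--
-- _STOP = ("in", "gameweek", "gw")
--
-- def extract_player_name_prediction(message):
--     words = message.translate(str.maketrans("", "", string.punctuation)).lower().split()
--     while "for" in words:
--         rest = words[words.index("for") + 1:]
--         cut = next((k for k, w in enumerate(rest) if w in _STOP), len(rest))
--         if cut:
--             return " ".join(rest[:cut]).capitalize()
--         words = rest
--     return None
-- ===== Notes on version B (the rewrite author's own statement) =====
-- stated objective: idiomatic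
-- what changed: Replaces A's enumerate-every-word outer loop and index-driven appending inner loop by a scan that jumps straight to each keyword occurrence via list.index and slicing, cutting the name at the first stop-word position found with next/enumerate instead of collecting parts one by one.
import Mathlib
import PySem

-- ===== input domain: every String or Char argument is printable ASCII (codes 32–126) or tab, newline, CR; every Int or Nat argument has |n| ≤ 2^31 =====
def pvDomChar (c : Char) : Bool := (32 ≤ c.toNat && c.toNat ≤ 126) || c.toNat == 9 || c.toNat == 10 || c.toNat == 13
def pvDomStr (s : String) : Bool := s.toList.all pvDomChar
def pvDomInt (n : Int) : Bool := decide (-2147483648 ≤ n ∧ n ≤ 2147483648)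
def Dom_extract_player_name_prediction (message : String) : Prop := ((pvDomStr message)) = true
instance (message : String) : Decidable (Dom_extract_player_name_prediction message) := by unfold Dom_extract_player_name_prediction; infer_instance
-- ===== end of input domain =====

-- B replaces A's enumerate-all-indices outer loop and part-collecting inner loop by a
-- jump-to-next-'for' scan with a single first-stop-word cut; same cost, more idiomatic.


-- shared Python built-in semantics, used identically by both Pythons:
-- string.punctuation
def pvPunct : List Char := "!\"#$%&'()*+,-./:;<=>?@[\\]^_`{|}~".toList

-- str.capitalize(): first char upper-cased, the rest lower-cased (exact on the ASCII domain,
-- where title-casing a single char = upper-casing it)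
def pvCapitalize (s : String) : String :=
  match s.toList with
  | [] => s
  | c :: cs => String.ofList (PySem.Chars.upperChar c :: cs.map PySem.Chars.lowerChar)

-- message.translate(str.maketrans("", "", string.punctuation)).lower().split()
-- (translate with a deletion table = filter out those chars)
def pvCleanWords (message : String) : List String :=
  PySem.Str.split₀ (PySem.Str.lower (String.ofList (message.toList.filter (fun c => !pvPunct.contains c))))

-- ===== PORT A =====
-- inner loop: for j in range(i+1, len(words)): break on boundary term, else append words[j]
def pvAInner : List String → List String
  | [] => []
  | w :: ws => if ["in", "gameweek", "gw"].contains w then [] else w :: pvAInner ws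

-- outer loop: for i, word in enumerate(words), recursing over the suffix of words at i
def pvAOuter : List String → Option String
  | [] => none
  | w :: rest =>
    if w == "for" && !rest.isEmpty then        -- word == "for" and i + 1 < len(words)
      let parts := pvAInner rest
      if parts.isEmpty then pvAOuter rest
      else some (pvCapitalize (PySem.Str.join " " parts))
    else pvAOuter rest

def extract_player_name_prediction (message : String) : Option String :=
  pvAOuter (pvCleanWords message)

-- ===== PORT B =====
-- while "for" in words: rest = words[idx+1:]; cut = first stop-word position (default len);
-- return the capitalized join of rest[:cut] if cut, else continue on rest
def pvBScan (words : List String) : Option String :=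
  match h : PySem.List.index? words "for" with
  | none => none
  | some i =>
    let rest := words.drop (i + 1)   -- words[words.index("for") + 1:], a nonnegative-index slice
    let cut := rest.findIdx (fun w => ["in", "gameweek", "gw"].contains w)  -- next((k for k,w in enumerate(rest) if w in _STOP), len(rest))
    if 0 < cut then some (pvCapitalize (PySem.Str.join " " (rest.take cut)))
    else pvBScan rest
termination_by words.length
decreasing_by
  have hm : "for" ∈ words := (PySem.List.index?_isSome_iff words "for").mp (by rw [h]; rfl)
  have := List.length_pos_of_mem hm
  simp only [List.length_drop]
  omega

def extract_player_name_prediction_alt (message : String) : Option String :=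
  pvBScan (pvCleanWords message)

-- ===== PRECONDITION & SPEC =====
def Spec_extract_player_name_prediction (message : String) (out : Option String) : Prop := out = extract_player_name_prediction_alt message
instance (message : String) (out : Option String) : Decidable (Spec_extract_player_name_prediction message out) := by unfold Spec_extract_player_name_prediction; infer_instance

-- ===== CLAIM (what is proved, stated in full; the proofs are below) =====
def Claim_equal_extract_player_name_prediction : Prop := ∀ (message : String), Dom_extract_player_name_prediction message → Spec_extract_player_name_prediction message (extract_player_name_prediction message)

-- ===== LEMMAS AND PROOFS =====

-- A's inner collecting loop takes exactly up to the first stop word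
lemma pvAInner_eq_take (xs : List String) :
    pvAInner xs = xs.take (xs.findIdx (fun w => ["in", "gameweek", "gw"].contains w)) := by
  induction xs with
  | nil => rfl
  | cons w ws ih =>
    simp only [pvAInner, List.findIdx_cons]
    by_cases hw : w = "in" ∨ w = "gameweek" ∨ w = "gw"
    · simp [hw]
    · push_neg at hw
      simp [hw.1, hw.2.1, hw.2.2, ih]

-- A's outer loop skips a prefix without "for"
lemma pvAOuter_append (pre t : List String) (hp : "for" ∉ pre) :
    pvAOuter (pre ++ t) = pvAOuter t := by
  induction pre with
  | nil => rfl
  | cons w ws ih =>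
    simp only [List.mem_cons, not_or] at hp
    have hw : w ≠ "for" := fun e => hp.1 e.symm
    simp [pvAOuter, hw, ih hp.2]

lemma pvAOuter_eq_pvBScan : ∀ (n : Nat) (ws : List String), ws.length ≤ n →
    pvAOuter ws = pvBScan ws := by
  intro n
  induction n with
  | zero =>
    intro ws h
    have : ws = [] := List.eq_nil_of_length_eq_zero (Nat.le_zero.mp h)
    subst this; rw [pvBScan]; rfl
  | succ n ih =>
    intro ws hlen
    rw [pvBScan]
    cases hidx : PySem.List.index? ws "for" with
    | none =>
      have hnm : "for" ∉ ws := (PySem.List.index?_eq_none_iff ws "for").mp hidx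
      have := pvAOuter_append ws [] hnm
      simp only [List.append_nil] at this
      simp [this, pvAOuter]
    | some i =>
      obtain ⟨pre, suf, hw, hlp, hnp⟩ := (PySem.List.index?_eq_some_iff ws "for" i).mp hidx
      subst hw
      have hdrop : List.drop (i + 1) (pre ++ "for" :: suf) = suf := by
        subst hlp
        have h2 : pre ++ "for" :: suf = (pre ++ ["for"]) ++ suf := by simp
        rw [h2, List.drop_left']
        simp
      rw [pvAOuter_append pre _ hnp]
      simp only [hdrop]
      cases suf with
      | nil =>
        have hB : pvBScan ([] : List String) = none := by rw [pvBScan]; rfl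
        simp [pvAOuter, List.findIdx_nil, hB]
      | cons a l =>
        rw [pvAOuter]
        simp only [beq_self_eq_true, List.isEmpty_cons, Bool.not_false, Bool.and_self, if_true,
          pvAInner_eq_take]
        rcases Nat.eq_zero_or_pos (List.findIdx (fun w => ["in", "gameweek", "gw"].contains w) (a :: l)) with h0 | hpos
        · have hsl : (a :: l).length ≤ n := by
            simp only [List.length_append, List.length_cons] at hlen
            simp only [List.length_cons]
            omega
          simp only [h0, List.take_zero, List.isEmpty_nil, if_true, Nat.lt_irrefl, if_false]
          exact ih _ hsl
        · obtain ⟨m, hm⟩ : ∃ m, List.findIdx (fun w => ["in", "gameweek", "gw"].contains w) (a :: l) = m + 1 :=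
            ⟨_, (Nat.succ_pred_eq_of_pos hpos).symm⟩
          have hm' : List.findIdx (fun w => decide (w = "in") || (decide (w = "gameweek") || decide (w = "gw"))) (a :: l) = m + 1 := by
            simpa using hm
          simp [hm']

-- ===== VERDICT (by name: the statement is the Claim_ definition above) =====
theorem extract_player_name_prediction_spec : Claim_equal_extract_player_name_prediction := by
  intro message _
  unfold Spec_extract_player_name_prediction extract_player_name_prediction extract_player_name_prediction_alt
  exact pvAOuter_eq_pvBScan (pvCleanWords message).length _ le_rfl
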